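-- pv_equiv track=rewrite | github.com/ku-wolf/code_interview | code_interview/chapter8/boolean_evaluation.py | generate_test_exps
-- ===== SOURCE A (Python) =====
-- def bool_ops_gen():
--     yield "&"
--     yield "|"
--     yield "^"
--
-- def generate_test_exps(length, acc=None):
--     if acc is None:
--         acc = []
--
--     if length == 0:
--         yield "".join(acc)
--     else:
--         if not acc:
--             yield from generate_test_exps(length - 1, ["0"])
--             yield from generate_test_exps(length - 1, ["1"])
--
--         else:
--             yield "".join(acc)
--             for op in bool_ops_gen():
--                 acc.append(op)
--                 acc.append("0")
--                 yield from generate_test_exps(length - 1, acc)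
--                 acc.pop()
--                 acc.append("1")
--                 yield from generate_test_exps(length - 1, acc)
--                 acc.pop()
--                 acc.pop()
-- ===== SOURCE B (Python) =====
-- def generate_test_exps(length, acc=None):
--     # Explicit stack of (prefix, remaining) replacing A's recursion; pre-order preserved.
--     if acc:
--         stack = [("".join(acc), length)]
--     elif length == 0:
--         yield ""
--         return
--     else:
--         stack = [("1", length - 1), ("0", length - 1)]
--     while stack:
--         prefix, rem = stack.pop()
--         yield prefix
--         if rem != 0:
--             for op in "^|&":
--                 for d in "10":
--                     stack.append((prefix + op + d, rem - 1))
-- ===== Notes on version B (the rewrite author's own statement) =====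
-- stated objective: alternative
-- what changed: Replaces A's recursive generator (with in-place append/pop backtracking on acc) by an iterative explicit-stack loop of (prefix, remaining) pairs, pushing the six children in reverse so pop order preserves A's pre-order output.
import Mathlib
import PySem

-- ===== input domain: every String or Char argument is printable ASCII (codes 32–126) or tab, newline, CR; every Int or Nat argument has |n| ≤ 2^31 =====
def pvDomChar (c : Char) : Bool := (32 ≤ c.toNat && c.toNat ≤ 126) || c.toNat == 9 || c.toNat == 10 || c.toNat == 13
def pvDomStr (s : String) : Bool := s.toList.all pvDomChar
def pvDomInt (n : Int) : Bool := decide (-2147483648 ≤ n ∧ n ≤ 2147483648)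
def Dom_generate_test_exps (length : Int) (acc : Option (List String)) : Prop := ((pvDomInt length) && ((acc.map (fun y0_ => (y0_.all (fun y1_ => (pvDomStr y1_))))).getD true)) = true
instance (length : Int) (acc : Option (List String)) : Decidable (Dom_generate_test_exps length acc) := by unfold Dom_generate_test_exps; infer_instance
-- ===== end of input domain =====

-- B replaces A's generator recursion by an explicit stack loop (same pre-order output); equivalence is about the yielded sequence (A also temporarily mutates a caller-supplied acc, restoring it).

-- ===== PORT A =====
-- recursion on the Nat value of length (the Python recursion decreases length to 0)
def pvGenA : Nat → List String → List String
  | 0, acc => [String.join acc]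
  | n+1, acc =>
    if acc = [] then
      pvGenA n ["0"] ++ pvGenA n ["1"]
    else
      String.join acc ::
        (["&", "|", "^"].foldl
          (fun out op => out ++ pvGenA n (acc ++ [op, "0"]) ++ pvGenA n (acc ++ [op, "1"])) [])

def generate_test_exps (length : Int) (acc : Option (List String)) : List String :=
  -- negative length: Python A recurses forever (RecursionError); excluded by Pre_
  if length < 0 then [] else pvGenA length.toNat (acc.getD [])

-- ===== PORT B =====
-- fuel for the stack loop (a bound on the number of iterations; makes the loop total)
def pvWeight : Nat → Nat
  | 0 => 1
  | n+1 => 1 + 6 * pvWeight n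

def pvStackW : List (String × Nat) → Nat
  | [] => 0
  | (_, r) :: rest => pvWeight r + pvStackW rest

def pvGenBLoop : Nat → List (String × Nat) → List String
  | _, [] => []
  | 0, _ :: _ => []   -- never reached when fuel ≥ pvStackW stack
  | f+1, (p, rem) :: rest =>
    if rem = 0 then p :: pvGenBLoop f rest
    else
      p :: pvGenBLoop f
        (["^", "|", "&"].foldl
          (fun st op => ["1", "0"].foldl (fun st d => ((p ++ op) ++ d, rem - 1) :: st) st) rest)

def generate_test_exps_alt (length : Int) (acc : Option (List String)) : List String :=
  if length < 0 then [] else    -- negative length: Python B loops forever; excluded by Pre_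
  let accL := acc.getD []
  let stack : List (String × Nat) :=
    if accL ≠ [] then [(String.join accL, length.toNat)]
    else if length = 0 then []
    else [("0", (length - 1).toNat), ("1", (length - 1).toNat)]
  if accL = [] ∧ length = 0 then [""]
  else pvGenBLoop (pvStackW stack) stack

-- ===== PRECONDITION & SPEC =====
-- On negative length both Pythons fail to return (A: RecursionError, B: unbounded loop).
def Pre_generate_test_exps (length : Int) (acc : Option (List String)) : Prop := 0 ≤ length
instance (length : Int) (acc : Option (List String)) : Decidable (Pre_generate_test_exps length acc) := by unfold Pre_generate_test_exps; infer_instance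
def pvWitness_generate_test_exps : Int × Option (List String) := (2, some ["1"])

def Spec_generate_test_exps (length : Int) (acc : Option (List String)) (out : List String) : Prop := out = generate_test_exps_alt length acc
instance (length : Int) (acc : Option (List String)) (out : List String) : Decidable (Spec_generate_test_exps length acc out) := by unfold Spec_generate_test_exps; infer_instance

-- ===== CLAIM (what is proved, stated in full; the proofs are below) =====
def Claim_equal_generate_test_exps : Prop := ∀ (length : Int) (acc : Option (List String)), Dom_generate_test_exps length acc → Pre_generate_test_exps length acc → Spec_generate_test_exps length acc (generate_test_exps length acc)

-- ===== LEMMAS AND PROOFS =====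

-- the common pre-order specification
def pvPre : Nat → String → List String
  | 0, p => [p]
  | n+1, p =>
    p :: (pvPre n ((p ++ "&") ++ "0") ++ pvPre n ((p ++ "&") ++ "1") ++
          pvPre n ((p ++ "|") ++ "0") ++ pvPre n ((p ++ "|") ++ "1") ++
          pvPre n ((p ++ "^") ++ "0") ++ pvPre n ((p ++ "^") ++ "1"))

def pvPreStack : List (String × Nat) → List String
  | [] => []
  | (p, r) :: rest => pvPre r p ++ pvPreStack rest

theorem pvJoin_append_two (l : List String) (a b : String) :
    String.join (l ++ [a, b]) = (String.join l ++ a) ++ b := by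
  simp [String.join, List.foldl_append]

theorem pvGenA_eq (n : Nat) : ∀ acc : List String, acc ≠ [] →
    pvGenA n acc = pvPre n (String.join acc) := by
  induction n with
  | zero => intro acc _; simp [pvGenA, pvPre]
  | succ n ih =>
    intro acc hacc
    have hne : ∀ op d : String, acc ++ [op, d] ≠ [] := by simp
    simp only [pvGenA, if_neg hacc, List.foldl, pvPre]
    rw [ih _ (hne "&" "0"), ih _ (hne "&" "1"), ih _ (hne "|" "0"), ih _ (hne "|" "1"),
        ih _ (hne "^" "0"), ih _ (hne "^" "1")]
    simp [pvJoin_append_two]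

theorem pvWeight_pos (r : Nat) : 1 ≤ pvWeight r := by
  cases r <;> simp [pvWeight]

theorem pvGenBLoop_eq (f : Nat) : ∀ s : List (String × Nat), pvStackW s ≤ f →
    pvGenBLoop f s = pvPreStack s := by
  induction f with
  | zero =>
    intro s hs
    cases s with
    | nil => simp [pvGenBLoop, pvPreStack]
    | cons x rest =>
      exfalso
      obtain ⟨p, r⟩ := x
      have := pvWeight_pos r
      simp [pvStackW] at hs
      omega
  | succ f ih =>
    intro s hs
    cases s with
    | nil => simp [pvGenBLoop, pvPreStack]
    | cons x rest =>
      obtain ⟨p, r⟩ := x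
      cases r with
      | zero =>
        have hrest : pvStackW rest ≤ f := by
          simp [pvStackW, pvWeight] at hs; omega
        simp [pvGenBLoop, ih rest hrest, pvPreStack, pvPre]
      | succ m =>
        simp only [pvStackW, pvWeight] at hs
        simp only [pvGenBLoop, List.foldl, if_neg (Nat.succ_ne_zero m)]
        have hle : pvStackW
            ((((p ++ "&") ++ "0"), m) :: (((p ++ "&") ++ "1"), m) :: (((p ++ "|") ++ "0"), m) ::
             (((p ++ "|") ++ "1"), m) :: (((p ++ "^") ++ "0"), m) :: (((p ++ "^") ++ "1"), m) :: rest)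
            ≤ f := by
          simp only [pvStackW]
          omega
        rw [show m + 1 - 1 = m from rfl, ih _ hle]
        simp [pvPreStack, pvPre]

theorem pvJoin_single : String.join ["0"] = "0" ∧ String.join ["1"] = "1" := by decide

theorem generate_test_exps_spec : Claim_equal_generate_test_exps := by
  intro length acc _ hpre
  have h0 : 0 ≤ length := hpre
  unfold Spec_generate_test_exps generate_test_exps generate_test_exps_alt
  rw [if_neg (by omega), if_neg (by omega)]
  by_cases hA : acc.getD [] = []
  · by_cases hz : length = 0
    · subst hz
      simp [hA, pvGenA, String.join]
    · obtain ⟨k, hk⟩ : ∃ k, length.toNat = k + 1 := ⟨(length - 1).toNat, by omega⟩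
      have hk1 : (length - 1).toNat = k := by omega
      simp only [hA, hz, if_neg, not_true, ne_eq, hk, hk1, not_false_iff]
      rw [pvGenBLoop_eq _ _ le_rfl]
      rw [show pvGenA (k + 1) [] = pvGenA k ["0"] ++ pvGenA k ["1"] by simp [pvGenA]]
      rw [pvGenA_eq k ["0"] (by simp), pvGenA_eq k ["1"] (by simp),
          pvJoin_single.1, pvJoin_single.2]
      simp [pvPreStack]
  · have hz' : ¬ (acc.getD [] = [] ∧ length = 0) := by simp [hA]
    simp only [ne_eq, hA, not_false_iff, ite_true, false_and, if_false]
    rw [pvGenBLoop_eq _ _ le_rfl, pvGenA_eq length.toNat (acc.getD []) hA]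
    simp [pvPreStack]
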